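-- pv_equiv track=rewrite | github.com/simonpf/pytorch_retrieve | pytorch_retrieve/tiling.py | get_start_and_clips
-- ===== SOURCE A (Python) =====
-- def get_start_and_clips(n, tile_size, overlap, soft_end: bool = False):
--     """Calculate start indices and numbers of clipped pixels for a given
--     side length, tile size and overlap.
--
--     Args:
--         n: The image size to tile in pixels.
--         tile_size: The size of each tile
--         overlap: The number of pixels of overlap.
--         soft_end: Allow the last tile to go beyond ``n``, see notes for details
--
--     Return:
--         A tuple ``(start, clip)`` containing the start indices of each tile
--         and the number of pixels to clip between each neighboring tiles.
--
--     Notes: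
--         ``soft_end`` is intended to use for cylindrical wrapping of the tiles
--         along the horizontal dimension, for example, to have a tile that
--         covers the antimeridian. The handling of this special tile should be
--         done outside this function.
--     """
--     start = []
--     clip = []
--     j = 0
--     while j + tile_size < n:
--         start.append(j)
--         if j > 0:
--             clip.append(overlap // 2)
--         j = j + tile_size - overlap
--     if not soft_end:
--         start.append(max(n - tile_size, 0))
--     else:
--         start.append(j)
--     if len(start) > 1:
--         clip.append((start[-2] + tile_size - start[-1]) // 2)
--     start = start
--     clip = clip
--     return start, clip
-- ===== SOURCE B (Python) =====
-- def get_start_and_clips(n, tile_size, overlap, soft_end: bool = False):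
--     """Closed-form re-implementation: start indices computed by ceil division
--     instead of a while loop, clips derived pairwise from consecutive starts."""
--     step = tile_size - overlap
--     if n > tile_size:
--         count = -((tile_size - n) // step)  # ceil((n - tile_size) / step)
--     else:
--         count = 0
--     start = [i * step for i in range(count)]
--     if soft_end:
--         start.append(count * step)
--     else:
--         start.append(max(n - tile_size, 0))
--     clip = [(start[i] + tile_size - start[i + 1]) // 2 for i in range(len(start) - 1)]
--     return start, clip
-- ===== Notes on version B (the rewrite author's own statement) =====
-- stated objective: simpler
-- what changed: B replaces A's stateful while-loop (which interleaves appending starts and clips and special-cases the last clip) by a closed-form start list via ceiling division and a single uniform pairwise pass deriving every clip from consecutive starts.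
import Mathlib
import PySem

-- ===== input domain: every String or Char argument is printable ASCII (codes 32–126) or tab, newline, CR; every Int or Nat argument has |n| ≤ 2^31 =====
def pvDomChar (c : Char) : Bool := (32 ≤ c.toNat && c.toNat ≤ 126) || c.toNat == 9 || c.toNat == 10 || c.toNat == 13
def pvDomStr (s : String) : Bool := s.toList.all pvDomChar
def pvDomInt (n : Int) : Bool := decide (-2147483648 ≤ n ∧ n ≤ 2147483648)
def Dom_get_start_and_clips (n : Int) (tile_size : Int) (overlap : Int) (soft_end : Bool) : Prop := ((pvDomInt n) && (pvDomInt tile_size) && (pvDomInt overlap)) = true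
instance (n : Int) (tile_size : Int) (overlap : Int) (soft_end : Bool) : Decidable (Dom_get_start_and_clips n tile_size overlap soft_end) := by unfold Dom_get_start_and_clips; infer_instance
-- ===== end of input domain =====

-- B replaces A's while loop by a closed-form (ceiling-division) start list and derives
-- every clip uniformly from consecutive starts in a second pass (objective: simpler).

-- ===== PORT A =====
-- fuel-total transcription of A's while loop; with fuel ≥ n - tile_size - j the fuel
-- never runs out on inputs satisfying Pre_ (step ≥ 1), so the base case is unreachable there
def pvLoopA (n : Int) (tile_size : Int) (overlap : Int) :
    Nat → Int → List Int → List Int → List Int × List Int × Int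
  | fuel, j, start, clip =>
    if j + tile_size < n then
      match fuel with
      | 0 => (start, clip, j)
      | fuel + 1 =>
          pvLoopA n tile_size overlap fuel (j + tile_size - overlap)
            (start ++ [j])
            (if j > 0 then clip ++ [PySem.Int.floordiv overlap 2] else clip)
    else (start, clip, j)

def get_start_and_clips (n : Int) (tile_size : Int) (overlap : Int) (soft_end : Bool) : List Int × List Int :=
  let r := pvLoopA n tile_size overlap (n - tile_size).toNat 0 [] []
  let start := r.1
  let clip := r.2.1
  let j := r.2.2
  let start := if !soft_end then start ++ [max (n - tile_size) 0] else start ++ [j]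
  let clip := if start.length > 1 then
      clip ++ [PySem.Int.floordiv ((PySem.List.pyGetD start (-2) 0) + tile_size - (PySem.List.pyGetD start (-1) 0)) 2]
    else clip
  (start, clip)

-- ===== PORT B =====
def get_start_and_clips_alt (n : Int) (tile_size : Int) (overlap : Int) (soft_end : Bool) : List Int × List Int :=
  let step := tile_size - overlap
  let count : Int := if n > tile_size then -(PySem.Int.floordiv (tile_size - n) step) else 0
  let start := (PySem.List.pyRange 0 count 1).map (fun i => i * step)
  let start := if soft_end then start ++ [count * step] else start ++ [max (n - tile_size) 0]
  let clip := (PySem.List.pyRange 0 ((start.length : Int) - 1) 1).map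
      (fun i => PySem.Int.floordiv ((PySem.List.pyGetD start i 0) + tile_size - (PySem.List.pyGetD start (i + 1) 0)) 2)
  (start, clip)

-- ===== PRECONDITION & SPEC =====
-- Pre_ excludes exactly the inputs on which A never returns: if the loop runs at all
-- (tile_size < n) a non-positive step tile_size - overlap makes A's while loop diverge.
def Pre_get_start_and_clips (n : Int) (tile_size : Int) (overlap : Int) (soft_end : Bool) : Prop :=
  tile_size < n → overlap < tile_size
instance (n : Int) (tile_size : Int) (overlap : Int) (soft_end : Bool) : Decidable (Pre_get_start_and_clips n tile_size overlap soft_end) := by unfold Pre_get_start_and_clips; infer_instance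

def pvWitness_get_start_and_clips : Int × Int × Int × Bool := (10, 4, 1, false)

def Spec_get_start_and_clips (n : Int) (tile_size : Int) (overlap : Int) (soft_end : Bool) (out : List Int × List Int) : Prop := out = get_start_and_clips_alt n tile_size overlap soft_end
instance (n : Int) (tile_size : Int) (overlap : Int) (soft_end : Bool) (out : List Int × List Int) : Decidable (Spec_get_start_and_clips n tile_size overlap soft_end out) := by unfold Spec_get_start_and_clips; infer_instance

-- ===== CLAIM (what is proved, stated in full; the proofs are below) =====
def Claim_equal_get_start_and_clips : Prop := ∀ (n : Int) (tile_size : Int) (overlap : Int) (soft_end : Bool), Dom_get_start_and_clips n tile_size overlap soft_end → Pre_get_start_and_clips n tile_size overlap soft_end → Spec_get_start_and_clips n tile_size overlap soft_end (get_start_and_clips n tile_size overlap soft_end)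

-- ===== LEMMAS AND PROOFS =====

-- characterization of A's loop for j = i * step, step ≥ 1, when fuel suffices
theorem pvLoopA_char (n tile_size overlap : Int) (hstep : overlap < tile_size)
    (count : Int) (hc1 : (count - 1) * (tile_size - overlap) < n - tile_size)
    (hc2 : n - tile_size ≤ count * (tile_size - overlap)) :
    ∀ (fuel : Nat) (i : Int) (s c : List Int), 0 ≤ i →
      n - tile_size - i * (tile_size - overlap) ≤ (fuel : Int) →
      pvLoopA n tile_size overlap fuel (i * (tile_size - overlap)) s c =
        (s ++ (PySem.List.pyRange i count 1).map (fun k => k * (tile_size - overlap)),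
         c ++ (PySem.List.pyRange (max i 1) count 1).map (fun _ => PySem.Int.floordiv overlap 2),
         (max i count) * (tile_size - overlap)) := by
  have hst : 1 ≤ tile_size - overlap := by omega
  intro fuel
  induction fuel with
  | zero =>
    intro i s c hi hfuel
    have hge : count ≤ i := by
      by_contra h
      push_neg at h
      have h1 : i ≤ count - 1 := by omega
      have h2 := mul_le_mul_of_nonneg_right h1 (by omega : (0:Int) ≤ tile_size - overlap)
      have h3 : n - tile_size - i * (tile_size - overlap) ≤ 0 := by exact_mod_cast hfuel
      linarith
    have hcond : ¬ (i * (tile_size - overlap) + tile_size < n) := by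
      have h3 : n - tile_size - i * (tile_size - overlap) ≤ 0 := by exact_mod_cast hfuel
      omega
    rw [pvLoopA, if_neg hcond]
    rw [PySem.List.pyRange_one_eq_nil hge, PySem.List.pyRange_one_eq_nil (by omega : count ≤ max i 1)]
    simp [max_eq_left hge]
  | succ fuel IH =>
    intro i s c hi hfuel
    by_cases hcond : i * (tile_size - overlap) + tile_size < n
    · have hlt : i < count := by nlinarith
      rw [pvLoopA, if_pos hcond]
      have hj : i * (tile_size - overlap) + tile_size - overlap = (i + 1) * (tile_size - overlap) := by ring
      rw [hj]
      rw [IH (i+1) _ _ (by omega) (by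
        have hexp : (i+1)*(tile_size-overlap) = i*(tile_size-overlap)+(tile_size-overlap) := by ring
        push_cast at hfuel ⊢
        linarith)]
      rw [PySem.List.pyRange_one_cons hlt]
      have hmax : max (i+1) count = max i count := by omega
      refine Prod.ext ?_ (Prod.ext ?_ ?_) <;> simp [hmax]
      · -- clips
        by_cases hi0 : 0 < i
        · rw [if_pos (by positivity : (0:Int) < i * (tile_size - overlap))]
          have h1 : max (i+1) 1 = i + 1 := by omega
          have h2 : max i 1 = i := by omega
          rw [h1, h2]
          rw [show (count - i).toNat = (count - (i+1)).toNat + 1 from by omega]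
          simp [List.replicate_succ]
        · have hi0' : i = 0 := by omega
          subst hi0'
          simp
    · have hge : count ≤ i := by nlinarith
      rw [pvLoopA, if_neg hcond]
      rw [PySem.List.pyRange_one_eq_nil hge, PySem.List.pyRange_one_eq_nil (by omega : count ≤ max i 1)]
      simp [max_eq_left hge]



theorem pv_clip_eq (tile_size overlap count final : Int) (xs : List Int) (hc : 1 ≤ count)
    (hxs : xs = (PySem.List.pyRange 0 count 1).map (fun k => k * (tile_size - overlap)) ++ [final]) :
    (PySem.List.pyRange 1 count 1).map (fun _ => PySem.Int.floordiv overlap 2) ++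
      [PySem.Int.floordiv ((PySem.List.pyGetD xs (-2) 0) + tile_size - (PySem.List.pyGetD xs (-1) 0)) 2] =
    (PySem.List.pyRange 0 count 1).map
      (fun i => PySem.Int.floordiv
        ((PySem.List.pyGetD xs i 0) + tile_size - (PySem.List.pyGetD xs (i + 1) 0)) 2) := by
  have hPlen : ((PySem.List.pyRange 0 count 1).map (fun k => k * (tile_size - overlap))).length = count.toNat := by
    simp [PySem.List.length_pyRange_one]
  have hslen : xs.length = count.toNat + 1 := by rw [hxs]; simp [hPlen]
  have hget : ∀ i : Int, 0 ≤ i → i < count →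
      PySem.List.pyGetD xs i 0 = i * (tile_size - overlap) := by
    intro i h0 hlt
    rw [PySem.List.pyGetD_eq_getElem _ _ h0 (by simp only [PySem.List.len_eq, hslen]; omega)]
    rw [List.getElem_eq_iff]
    rw [hxs, List.getElem?_append_left (by rw [hPlen]; omega), List.getElem?_map,
      PySem.List.getElem?_pyRange_one, if_pos (by omega)]
    simp only [Option.map_some, Option.some.injEq]
    congr 1
    omega
  have hlastget : PySem.List.pyGetD xs count 0 = final := by
    rw [PySem.List.pyGetD_eq_getElem _ _ (by omega) (by simp only [PySem.List.len_eq, hslen]; omega)]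
    rw [List.getElem_eq_iff]
    rw [hxs, List.getElem?_append_right (by rw [hPlen])]
    rw [show count.toNat - ((PySem.List.pyRange 0 count 1).map (fun k => k * (tile_size - overlap))).length = 0 from by rw [hPlen]; omega]
    rfl
  have hm1 : PySem.List.pyGetD xs (-1) 0 = final := by
    rw [hxs]; exact PySem.List.pyGetD_neg_one_append_singleton _ _ _
  have hm2 : PySem.List.pyGetD xs (-2) 0 = (count - 1) * (tile_size - overlap) := by
    rw [show (-2 : Int) = -((2:Nat) : Int) from by norm_num,
      PySem.List.pyGetD_neg_natCast _ _ _ (by omega) (by omega)]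
    rw [List.getElem_eq_iff (by omega)]
    rw [hxs]
    rw [List.getElem?_append_left (by simp only [List.length_append, List.length_cons,
      List.length_nil, hPlen, hslen]; omega)]
    rw [List.getElem?_map, PySem.List.getElem?_pyRange_one,
      if_pos (by simp only [List.length_append, List.length_cons, List.length_nil, hPlen, hslen]; omega)]
    simp only [Option.map_some, Option.some.injEq]
    congr 1
    simp only [List.length_append, List.length_cons, List.length_nil, hPlen]
    omega
  rw [hm1, hm2]
  apply List.ext_getElem?
  intro k
  rw [List.getElem?_map, PySem.List.getElem?_pyRange_one]
  by_cases hk : k < (count - 1).toNat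
  · rw [List.getElem?_append_left (by simp only [List.length_map, PySem.List.length_pyRange_one]; omega),
      List.getElem?_map, PySem.List.getElem?_pyRange_one, if_pos (by omega), if_pos (by omega)]
    simp only [Option.map_some, Option.some.injEq]
    rw [hget _ (by omega) (by omega), hget _ (by omega) (by omega)]
    congr 1
    ring
  · by_cases hk2 : k < (count - 0).toNat
    · rw [List.getElem?_append_right (by simp only [List.length_map, PySem.List.length_pyRange_one]; omega)]
      rw [show k - ((PySem.List.pyRange 1 count 1).map (fun _ => PySem.Int.floordiv overlap 2)).length = 0 from by
        simp only [List.length_map, PySem.List.length_pyRange_one]; omega]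
      rw [if_pos hk2]
      simp only [Option.map_some, List.getElem?_cons_zero, Option.some.injEq]
      have hkc : (0:Int) + (k : Int) = count - 1 := by omega
      rw [hkc, hget (count - 1) (by omega) (by omega), show count - 1 + 1 = count from by ring, hlastget]
    · rw [List.getElem?_eq_none (by simp only [List.length_append, List.length_map, List.length_cons,
        List.length_nil, PySem.List.length_pyRange_one]; omega), if_neg hk2]
      rfl

theorem pv_main (n tile_size overlap : Int) (soft_end : Bool)
    (hpre : Pre_get_start_and_clips n tile_size overlap soft_end) :
    get_start_and_clips n tile_size overlap soft_end = get_start_and_clips_alt n tile_size overlap soft_end := by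
  unfold get_start_and_clips get_start_and_clips_alt
  by_cases hn : tile_size < n
  · have hstep : overlap < tile_size := hpre hn
    set count : Int := -(PySem.Int.floordiv (tile_size - n) (tile_size - overlap)) with hcount
    have hqs : (count - 1) * (tile_size - overlap) < n - tile_size ∧ n - tile_size ≤ count * (tile_size - overlap) := by
      have h := (PySem.Int.neg_floordiv_neg_eq_iff_of_pos (a := n - tile_size) (b := tile_size - overlap) (q := count) (by omega)).mp
      have harg : -(n - tile_size) = tile_size - n := by ring
      rw [harg] at h
      exact h hcount.symm
    have hc1 := hqs.1
    have hc2 := hqs.2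
    have hcpos : 1 ≤ count := by nlinarith
    have hloop := pvLoopA_char n tile_size overlap hstep count hc1 hc2 (n - tile_size).toNat 0 [] [] le_rfl (by
      rw [zero_mul, sub_zero]
      exact Int.self_le_toNat _)
    rw [zero_mul] at hloop
    rw [show max (0:Int) 1 = 1 from rfl, show max (0:Int) count = count from by omega] at hloop
    simp only [List.nil_append] at hloop
    simp only [hloop]
    rw [if_pos (show n > tile_size from hn)]
    have hPlen : ((PySem.List.pyRange 0 count 1).map (fun k => k * (tile_size - overlap))).length = count.toNat := by
      simp [PySem.List.length_pyRange_one]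
    cases soft_end
    · simp only [Bool.not_false, if_pos, if_neg, Bool.false_eq_true, if_false, if_true]
      rw [if_pos (by simp only [List.length_append, List.length_cons, List.length_nil, hPlen]; omega)]
      refine Prod.ext rfl ?_
      rw [show ((((PySem.List.pyRange 0 count 1).map (fun i => i * (tile_size - overlap)) ++ [max (n - tile_size) 0]).length : Int) - 1) = count from by
        simp only [List.length_append, List.length_cons, List.length_nil, hPlen]; omega]
      exact pv_clip_eq tile_size overlap count (max (n - tile_size) 0) _ hcpos rfl
    · simp only [Bool.not_true, Bool.false_eq_true, if_false, if_true]
      rw [if_pos (by simp only [List.length_append, List.length_cons, List.length_nil, hPlen]; omega)]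
      refine Prod.ext rfl ?_
      rw [show ((((PySem.List.pyRange 0 count 1).map (fun i => i * (tile_size - overlap)) ++ [count * (tile_size - overlap)]).length : Int) - 1) = count from by
        simp only [List.length_append, List.length_cons, List.length_nil, hPlen]; omega]
      exact pv_clip_eq tile_size overlap count (count * (tile_size - overlap)) _ hcpos rfl
  · have hnr : pvLoopA n tile_size overlap (n - tile_size).toNat 0 [] [] = ([], [], 0) := by
      rw [pvLoopA.eq_def]
      dsimp only
      rw [if_neg (show ¬ ((0:Int) + tile_size < n) from by omega)]
    simp only [hnr]
    rw [if_neg (show ¬ n > tile_size from by omega)]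
    rw [PySem.List.pyRange_one_eq_nil le_rfl]
    cases soft_end <;> simp [PySem.List.pyRange_one_eq_nil]

theorem get_start_and_clips_spec : Claim_equal_get_start_and_clips := by
  intro n tile_size overlap soft_end hdom hpre
  exact pv_main n tile_size overlap soft_end hpre
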